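-- pv_equiv track=rewrite | github.com/ybracke/transnormer | src/transnormer/visualization/formatting.py | markup_spans
-- ===== SOURCE A (Python) =====
-- from typing import List, Tuple
--
-- def markup_spans(
--     text: str,
--     spans: List[Tuple[int, int]],
--     opening_tag: str = "<span>",
--     closing_tag: str = "</span>",
-- ) -> str:
--     """Insert markup tags at index positions in a string"""
--     if not text:
--         return text
--     marked_up_text = ""
--     # Make sure spans are in correct order
--     spans = sorted(spans)
--     end_prev_span = 0
--     # Build-up output str with mark-up tags
--     for i, j in spans:
--         if i < end_prev_span:
--             raise ValueError("Overlapping spans are not supported.")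
--         if i > j:
--             raise ValueError(
--                 "Spans (i,j), where i>j, are not supported. (Would garble output string.)"
--             )
--         marked_up_text += text[end_prev_span:i] + opening_tag + text[i:j] + closing_tag
--         end_prev_span = j
--     marked_up_text += text[end_prev_span:]
--     return marked_up_text
-- ===== SOURCE B (Python) =====
-- def markup_spans(
--     text,
--     spans,
--     opening_tag="<span>",
--     closing_tag="</span>",
-- ):
--     """Insert markup tags at index positions in a string"""
--     if not text:
--         return text
--     spans = sorted(spans)
--     # Validation pass over the sorted spans (same order, same messages as the original)
--     prev_end = 0
--     for i, j in spans:
--         if i < prev_end: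
--             raise ValueError("Overlapping spans are not supported.")
--         if i > j:
--             raise ValueError(
--                 "Spans (i,j), where i>j, are not supported. (Would garble output string.)"
--             )
--         prev_end = j
--     # Build from cut positions and a parallel tag list, then join the pieces
--     cuts = [0]
--     for i, j in spans:
--         cuts.extend((i, j))
--     cuts.append(len(text))
--     tags = [""] + [t for _ in spans for t in (opening_tag, closing_tag)]
--     return "".join(tag + text[a:b] for tag, a, b in zip(tags, cuts, cuts[1:]))
-- ===== Notes on version B (the rewrite author's own statement) =====
-- stated objective: alternative
-- what changed: Validation is a dedicated pass over the sorted spans, and the output is built from a position list (cuts) zipped with a parallel tag list and joined, instead of interleaving validation and string concatenation around an end_prev_span cursor.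
import Mathlib
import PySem

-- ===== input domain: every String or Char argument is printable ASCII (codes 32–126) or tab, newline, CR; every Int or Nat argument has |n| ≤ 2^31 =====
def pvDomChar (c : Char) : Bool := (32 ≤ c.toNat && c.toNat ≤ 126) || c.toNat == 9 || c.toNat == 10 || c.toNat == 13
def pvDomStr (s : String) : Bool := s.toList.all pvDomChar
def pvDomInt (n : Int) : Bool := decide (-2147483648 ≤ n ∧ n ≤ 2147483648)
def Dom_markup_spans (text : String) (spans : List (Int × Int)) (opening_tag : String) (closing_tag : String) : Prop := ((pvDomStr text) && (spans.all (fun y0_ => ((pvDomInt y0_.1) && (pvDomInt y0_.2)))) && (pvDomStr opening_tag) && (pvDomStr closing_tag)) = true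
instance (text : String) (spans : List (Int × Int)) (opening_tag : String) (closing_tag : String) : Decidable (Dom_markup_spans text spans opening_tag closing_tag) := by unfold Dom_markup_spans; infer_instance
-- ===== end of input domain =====

-- B builds the output from a cut-position list zipped with a parallel tag list (validation as a
-- separate pass) instead of A's interleaved cursor loop; equally fast, different decomposition.

-- ===== PORT A =====
-- A's raise branches are excluded by Pre_markup_spans; inside Pre_ the loop never raises.
def markup_spans (text : String) (spans : List (Int × Int)) (opening_tag : String) (closing_tag : String) : String :=
  if text = "" then text
  else
    let t := text.toList
    let ss := PySem.List.sorted2 spans Prod.fst Prod.snd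
    let st := ss.foldl
      (fun (st : List Char × Int) sp =>
        (st.1 ++ PySem.List.slice t (some st.2) (some sp.1) ++ opening_tag.toList
              ++ PySem.List.slice t (some sp.1) (some sp.2) ++ closing_tag.toList,
         sp.2))
      ([], 0)
    String.ofList (st.1 ++ PySem.List.slice t (some st.2) none)

-- ===== PORT B =====
-- B's raise branches in the validation pass are likewise excluded by Pre_markup_spans.
def markup_spans_alt (text : String) (spans : List (Int × Int)) (opening_tag : String) (closing_tag : String) : String :=
  if text = "" then text
  else
    let t := text.toList
    let ss := PySem.List.sorted2 spans Prod.fst Prod.snd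
    let cuts := (ss.foldl (fun acc sp => acc ++ [sp.1, sp.2]) [0]) ++ [(t.length : Int)]
    let tags := ([""] : List String) ++ ss.flatMap (fun _ => [opening_tag, closing_tag])
    String.ofList
      (((tags.zip (cuts.zip cuts.tail)).map
          (fun p => p.1.toList ++ PySem.List.slice t (some p.2.1) (some p.2.2))).flatten)

-- ===== PRECONDITION & SPEC =====
-- spansChainOk e ss: every sorted span (i,j) satisfies e ≤ i ≤ j with e the previous span's end —
-- exactly the inputs on which the Python raises no ValueError (empty text returns early, never raising).
def spansChainOk (e : Int) : List (Int × Int) → Bool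
  | [] => true
  | (i, j) :: rest => !(i < e) && !(i > j) && spansChainOk j rest

def Pre_markup_spans (text : String) (spans : List (Int × Int)) (opening_tag : String) (closing_tag : String) : Prop :=
  text = "" ∨ spansChainOk 0 (PySem.List.sorted2 spans Prod.fst Prod.snd) = true
instance (text : String) (spans : List (Int × Int)) (opening_tag : String) (closing_tag : String) : Decidable (Pre_markup_spans text spans opening_tag closing_tag) := by unfold Pre_markup_spans; infer_instance

def pvWitness_markup_spans : String × (List (Int × Int)) × String × String :=
  ("abcdef", [(4, 5), (1, 3)], "<b>", "</b>")

def Spec_markup_spans (text : String) (spans : List (Int × Int)) (opening_tag : String) (closing_tag : String) (out : String) : Prop := out = markup_spans_alt text spans opening_tag closing_tag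
instance (text : String) (spans : List (Int × Int)) (opening_tag : String) (closing_tag : String) (out : String) : Decidable (Spec_markup_spans text spans opening_tag closing_tag out) := by unfold Spec_markup_spans; infer_instance

-- ===== CLAIM (what is proved, stated in full; the proofs are below) =====
def Claim_equal_markup_spans : Prop := ∀ (text : String) (spans : List (Int × Int)) (opening_tag : String) (closing_tag : String), Dom_markup_spans text spans opening_tag closing_tag → Pre_markup_spans text spans opening_tag closing_tag → Spec_markup_spans text spans opening_tag closing_tag (markup_spans text spans opening_tag closing_tag)

-- ===== LEMMAS AND PROOFS =====

-- Common recursive description of the marked-up character list.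
def buildSpec (t o c : List Char) : Int → List (Int × Int) → List Char
  | e, [] => PySem.List.slice t (some e) none
  | e, (i, j) :: rest =>
      PySem.List.slice t (some e) (some i) ++ o ++ PySem.List.slice t (some i) (some j) ++ c
        ++ buildSpec t o c j rest

theorem slice_to_length (t : List Char) (e : Int) :
    PySem.List.slice t (some e) (some (t.length : Int)) = PySem.List.slice t (some e) none := by
  simp [PySem.List.slice, PySem.List.clampIdx]
  split_ifs <;> omega

theorem foldA_eq_buildSpec (t o c : List Char) (ss : List (Int × Int)) :
    ∀ (acc : List Char) (e : Int),
      (ss.foldl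
        (fun (st : List Char × Int) sp =>
          (st.1 ++ PySem.List.slice t (some st.2) (some sp.1) ++ o
                ++ PySem.List.slice t (some sp.1) (some sp.2) ++ c, sp.2))
        (acc, e)).1
        ++ PySem.List.slice t
            (some ((ss.foldl
              (fun (st : List Char × Int) sp =>
                (st.1 ++ PySem.List.slice t (some st.2) (some sp.1) ++ o
                      ++ PySem.List.slice t (some sp.1) (some sp.2) ++ c, sp.2))
              (acc, e)).2)) none
      = acc ++ buildSpec t o c e ss := by
  induction ss with
  | nil => intro acc e; simp [buildSpec]
  | cons sp rest ih =>
      intro acc e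
      simp only [List.foldl_cons, buildSpec]
      rw [ih]
      simp

theorem zipB_eq_buildSpec (t : List Char) (o c : String) (ss : List (Int × Int)) :
    ∀ (first : String) (e : Int),
      ((((first :: ss.flatMap (fun _ => [o, c])).zip
          (((e :: (ss.flatMap (fun sp => [sp.1, sp.2]) ++ [(t.length : Int)]))).zip
            (ss.flatMap (fun sp => [sp.1, sp.2]) ++ [(t.length : Int)]))).map
          (fun p => p.1.toList ++ PySem.List.slice t (some p.2.1) (some p.2.2))).flatten)
      = first.toList ++ buildSpec t o.toList c.toList e ss := by
  induction ss with
  | nil =>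
      intro first e
      simp [buildSpec, slice_to_length]
  | cons sp rest ih =>
      intro first e
      simp only [List.flatMap_cons, List.cons_append, List.zip_cons_cons, List.map_cons,
        List.flatten_cons, buildSpec, List.nil_append]
      rw [ih c sp.2]
      simp

theorem cuts_foldl_eq (ss : List (Int × Int)) (init : List Int) :
    ss.foldl (fun acc sp => acc ++ [sp.1, sp.2]) init
      = init ++ ss.flatMap (fun sp => [sp.1, sp.2]) := by
  induction ss generalizing init with
  | nil => simp
  | cons sp rest ih => simp [ih]

theorem ports_agree (text : String) (spans : List (Int × Int)) (o c : String) :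
    markup_spans text spans o c = markup_spans_alt text spans o c := by
  unfold markup_spans markup_spans_alt
  by_cases h : text = ""
  · simp [h]
  · simp only [h, if_false]
    rw [cuts_foldl_eq]
    simp only [List.cons_append, List.tail_cons, List.nil_append]
    rw [zipB_eq_buildSpec]
    rw [← foldA_eq_buildSpec]
    simp

-- ===== VERDICT (by name: the statement is the Claim_ definition above) =====
theorem markup_spans_spec : Claim_equal_markup_spans := by
  intro text spans o c _ _
  unfold Spec_markup_spans
  exact ports_agree text spans o c
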